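-- pv_equiv track=rewrite | github.com/Adeen317/Computer-Graphics-Algorithms | Point Clipping.py | point_clip
-- ===== SOURCE A (Python) =====
-- def compute_code(x, y, xmin, ymin, xmax, ymax):
--     code = 0
--     if x < xmin:
--         code |= 1
--     elif x > xmax:
--         code |= 2
--     if y < ymin:
--         code |= 4
--     elif y > ymax:
--         code |= 8
--     return code
--
-- def point_clip(x, y, xmin, ymin, xmax, ymax):
--     code = compute_code(x, y, xmin, ymin, xmax, ymax)
--
--     if code == 0:
--         return "Visible"
--
--     for i in range(4):
--         if code & (1 << i):
--             return "Invisible"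
--     return "Visible"
-- ===== SOURCE B (Python) =====
-- def point_clip(x, y, xmin, ymin, xmax, ymax):
--     if x < xmin or x > xmax or y < ymin or y > ymax:
--         return "Invisible"
--     return "Visible"
-- ===== Notes on version B (the rewrite author's own statement) =====
-- stated objective: simpler
-- what changed: Replaced the outcode helper and its 4-iteration bit-scan loop with a single inline boundary test returning Invisible/Visible directly.
import Mathlib
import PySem

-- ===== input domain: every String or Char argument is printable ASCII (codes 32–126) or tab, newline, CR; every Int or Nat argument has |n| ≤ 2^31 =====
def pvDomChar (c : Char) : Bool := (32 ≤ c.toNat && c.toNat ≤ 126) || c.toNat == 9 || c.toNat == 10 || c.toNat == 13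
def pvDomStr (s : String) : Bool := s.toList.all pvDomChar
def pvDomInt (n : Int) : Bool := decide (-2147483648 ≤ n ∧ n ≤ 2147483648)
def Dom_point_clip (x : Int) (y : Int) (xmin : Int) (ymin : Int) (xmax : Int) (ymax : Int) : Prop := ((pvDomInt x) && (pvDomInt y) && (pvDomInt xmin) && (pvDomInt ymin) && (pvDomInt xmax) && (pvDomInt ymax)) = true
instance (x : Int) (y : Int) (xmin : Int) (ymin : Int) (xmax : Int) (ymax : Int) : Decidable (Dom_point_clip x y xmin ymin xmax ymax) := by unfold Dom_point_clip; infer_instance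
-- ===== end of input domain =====

-- B inlines the visibility test: one direct boundary comparison replaces A's outcode helper and its 4-iteration bit-scan loop (objective: simpler).


-- ===== PORT A =====
-- helper of A: outcode with |=, same branch order
def compute_code (x : Int) (y : Int) (xmin : Int) (ymin : Int) (xmax : Int) (ymax : Int) : Int :=
  let code : Int := 0
  let code := if x < xmin then Int.lor code 1 else if x > xmax then Int.lor code 2 else code
  let code := if y < ymin then Int.lor code 4 else if y > ymax then Int.lor code 8 else code
  code

-- A's for-loop over range(4): first i with code & (1 << i) nonzero returns "Invisible"
def pcLoop (code : Int) : List Int → String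
  | [] => "Visible"
  | i :: rest => if Int.land code (Int.shiftLeft 1 i.toNat) ≠ 0 then "Invisible" else pcLoop code rest

def point_clip (x : Int) (y : Int) (xmin : Int) (ymin : Int) (xmax : Int) (ymax : Int) : String :=
  let code := compute_code x y xmin ymin xmax ymax
  if code = 0 then "Visible"
  else pcLoop code (PySem.List.pyRange 0 4 1)

-- ===== PORT B =====
def point_clip_alt (x : Int) (y : Int) (xmin : Int) (ymin : Int) (xmax : Int) (ymax : Int) : String :=
  if x < xmin ∨ x > xmax ∨ y < ymin ∨ y > ymax then "Invisible" else "Visible"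

-- ===== PRECONDITION & SPEC =====
def Spec_point_clip (x : Int) (y : Int) (xmin : Int) (ymin : Int) (xmax : Int) (ymax : Int) (out : String) : Prop := out = point_clip_alt x y xmin ymin xmax ymax
instance (x : Int) (y : Int) (xmin : Int) (ymin : Int) (xmax : Int) (ymax : Int) (out : String) : Decidable (Spec_point_clip x y xmin ymin xmax ymax out) := by unfold Spec_point_clip; infer_instance

-- ===== CLAIM (what is proved, stated in full; the proofs are below) =====
def Claim_equal_point_clip : Prop := ∀ (x : Int) (y : Int) (xmin : Int) (ymin : Int) (xmax : Int) (ymax : Int), Dom_point_clip x y xmin ymin xmax ymax → Spec_point_clip x y xmin ymin xmax ymax (point_clip x y xmin ymin xmax ymax)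

-- ===== LEMMAS AND PROOFS =====

-- ===== VERDICT (by name: the statement is the Claim_ definition above) =====
theorem point_clip_spec : Claim_equal_point_clip := by
  intro x y xmin ymin xmax ymax _
  unfold Spec_point_clip point_clip point_clip_alt compute_code
  split_ifs <;> simp_all <;> first | decide | omega
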